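-- pv_equiv track=rewrite | github.com/saimanaswini-k/Cognitive-Companion-Chatbot | train.py | data_prepping
-- ===== SOURCE A (Python) =====
-- def data_prepping(data):
--     data2=data.split('\n')
--     data2=[d.strip() for d in data2]
--     data2=[d for d in data2 if d!='']
--
--     questions=[]; answers=[]
--
--     for i in range(len(data2)):
--         if i%2==0:
--             answers.append(data2[i])
--         else:
--             questions.append(data2[i])
--     return questions, answers
-- ===== SOURCE B (Python) =====
-- def data_prepping(data):
--     cleaned = [s for s in (d.strip() for d in data.split('\n')) if s != '']
--     return cleaned[1::2], cleaned[0::2]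
-- ===== Notes on version B (the rewrite author's own statement) =====
-- stated objective: idiomatic
-- what changed: Replaces the index-parity loop with two strided slices cleaned[1::2]/cleaned[0::2] over the cleaned line list.
import Mathlib
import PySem

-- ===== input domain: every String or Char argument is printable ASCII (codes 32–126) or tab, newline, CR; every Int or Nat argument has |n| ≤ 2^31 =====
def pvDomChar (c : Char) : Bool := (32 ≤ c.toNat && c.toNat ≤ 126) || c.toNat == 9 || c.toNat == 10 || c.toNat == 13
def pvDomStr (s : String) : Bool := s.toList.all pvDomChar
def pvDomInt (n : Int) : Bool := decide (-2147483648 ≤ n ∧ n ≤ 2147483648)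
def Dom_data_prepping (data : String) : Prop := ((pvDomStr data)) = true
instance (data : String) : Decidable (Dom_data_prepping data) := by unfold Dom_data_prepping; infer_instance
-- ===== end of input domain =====

-- B replaces A's index-parity loop with two strided slices over the cleaned line list (more idiomatic; same cost).


-- ===== PORT A =====
def data_prepping (data : String) : List String × List String :=
  let data2 := (PySem.Str.split? data "\n").getD []
  let data2 := data2.map PySem.Str.strip
  let data2 := data2.filter (fun d => d != "")
  let qa := (PySem.List.pyRange 0 (PySem.List.len data2) 1).foldl
    (fun (st : List String × List String) i =>
      if PySem.Int.mod i 2 == 0 then (st.1, st.2 ++ [PySem.List.pyGetD data2 i ""])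
      else (st.1 ++ [PySem.List.pyGetD data2 i ""], st.2)) ([], [])
  (qa.1, qa.2)

-- ===== PORT B =====
def data_prepping_alt (data : String) : List String × List String :=
  let cleaned := (((PySem.Str.split? data "\n").getD []).map PySem.Str.strip).filter (fun s => s != "")
  ((PySem.List.slice? cleaned (some 1) none 2).getD [],
   (PySem.List.slice? cleaned (some 0) none 2).getD [])

-- ===== PRECONDITION & SPEC =====
def Spec_data_prepping (data : String) (out : List String × List String) : Prop := out = data_prepping_alt data
instance (data : String) (out : List String × List String) : Decidable (Spec_data_prepping data out) := by unfold Spec_data_prepping; infer_instance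

-- ===== CLAIM (what is proved, stated in full; the proofs are below) =====
def Claim_equal_data_prepping : Prop := ∀ (data : String), Dom_data_prepping data → Spec_data_prepping data (data_prepping data)

-- ===== LEMMAS AND PROOFS =====

/-- Elements of `l` at even positions (Python `l[0::2]`). -/
def pvEvens {α : Type} : List α → List α
  | [] => []
  | [x] => [x]
  | x :: _ :: rest => x :: pvEvens rest

/-- Elements of `l` at odd positions (Python `l[1::2]`). -/
def pvOdds {α : Type} : List α → List α
  | [] => []
  | [_] => []
  | _ :: y :: rest => y :: pvOdds rest

lemma pv_filterMap_evens {α : Type} (l : List α) :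
    List.filterMap (fun k => l[(2 * k)]?) (List.range ((l.length + 1) / 2)) = pvEvens l := by
  induction l using pvEvens.induct with
  | case1 => simp [pvEvens]
  | case2 x => simp [pvEvens]
  | case3 x y rest ih =>
    have hlen : ((x :: y :: rest).length + 1) / 2 = (rest.length + 1) / 2 + 1 := by
      simp
      omega
    rw [hlen, List.range_succ_eq_map,
        List.filterMap_cons_some (f := fun k => (x :: y :: rest)[2 * k]?) (a := 0) (b := x) (by simp),
        List.filterMap_map]
    simp only [pvEvens]
    rw [← ih]
    congr 1

lemma pv_filterMap_odds {α : Type} (l : List α) :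
    List.filterMap (fun k => l[(1 + 2 * k)]?) (List.range (l.length / 2)) = pvOdds l := by
  induction l using pvOdds.induct with
  | case1 => simp [pvOdds]
  | case2 x => simp [pvOdds]
  | case3 x y rest ih =>
    have hlen : (x :: y :: rest).length / 2 = rest.length / 2 + 1 := by
      simp
      omega
    rw [hlen, List.range_succ_eq_map,
        List.filterMap_cons_some (f := fun k => (x :: y :: rest)[1 + 2 * k]?) (a := 0) (b := y) (by simp),
        List.filterMap_map]
    simp only [pvOdds]
    rw [← ih]
    congr 1

lemma pv_slice_evens {α : Type} (l : List α) :
    PySem.List.slice? l (some 0) none 2 = some (pvEvens l) := by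
  simp only [PySem.List.slice?, PySem.List.sliceIndices]
  norm_num
  rw [← pv_filterMap_evens l]
  have hc : (if 0 < l.length then (((l.length : Int) + 2 - 1) / 2).toNat else 0) = (l.length + 1) / 2 := by
    split_ifs with h <;> omega
  rw [hc]
  apply List.filterMap_congr
  intro x _
  congr 1

lemma pv_slice_odds {α : Type} (l : List α) :
    PySem.List.slice? l (some 1) none 2 = some (pvOdds l) := by
  simp only [PySem.List.slice?, PySem.List.sliceIndices]
  norm_num
  rcases l with _ | ⟨x, l⟩
  · simp [pvOdds]
  · have hmin : min (1 : Int) ((x :: l).length : Int) = 1 := by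
      simp
    rw [hmin]
    rw [← pv_filterMap_odds (x :: l)]
    have hc : (if 1 < (x :: l).length then ((((x :: l).length : Int) - 1 + 2 - 1) / 2).toNat else 0) = (x :: l).length / 2 := by
      split_ifs with h <;> omega
    rw [hc]
    apply List.filterMap_congr
    intro k _
    congr 1

lemma pv_mod_two (s : Int) : PySem.Int.mod s 2 = s % 2 := by
  simp [PySem.Int.mod, Int.fmod_eq_emod]

lemma pv_loop_enum {α : Type} (l : List α) (s : Int) (q a : List α)
    (hs : s % 2 = 0) :
    (PySem.List.enumerate l s).foldl
      (fun (st : List α × List α) p =>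
        if PySem.Int.mod p.1 2 == 0 then (st.1, st.2 ++ [p.2])
        else (st.1 ++ [p.2], st.2)) (q, a)
      = (q ++ pvOdds l, a ++ pvEvens l) := by
  induction l using pvEvens.induct generalizing s q a with
  | case1 => simp [PySem.List.enumerate_nil, pvOdds, pvEvens]
  | case2 x =>
    simp [PySem.List.enumerate_cons, PySem.List.enumerate_nil, pvOdds, pvEvens, hs]
  | case3 x y rest ih =>
    rw [PySem.List.enumerate_cons, PySem.List.enumerate_cons]
    have h1 : (PySem.Int.mod s 2 == 0) = true := by rw [pv_mod_two]; simp [hs]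
    have h2 : (PySem.Int.mod (s + 1) 2 == 0) = false := by rw [pv_mod_two]; simp; omega
    simp only [List.foldl_cons, h1, h2, if_true, Bool.false_eq_true, if_false]
    rw [ih (s + 1 + 1) _ _ (by omega)]
    simp [pvOdds, pvEvens]

-- ===== VERDICT (by name: the statement is the Claim_ definition above) =====
theorem data_prepping_spec : Claim_equal_data_prepping := by
  intro data _
  unfold Spec_data_prepping data_prepping data_prepping_alt
  simp only []
  set cleaned := (((PySem.Str.split? data "\n").getD []).map PySem.Str.strip).filter (fun s => s != "") with hc
  have hloop := pv_loop_enum cleaned 0 [] [] (by decide)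
  rw [PySem.List.enumerate_eq_map_pyRange cleaned "", List.foldl_map] at hloop
  rw [hloop, pv_slice_evens, pv_slice_odds]
  simp
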